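-- pv_equiv track=rewrite | github.com/kguarian/publish_the_paper | data_retrieval_pipeline.py | truth_table_to_single_interval
-- ===== SOURCE A (Python) =====
-- def truth_table_to_single_interval(truth_table):
--     curr_interval = None
--     for i, val in enumerate(truth_table):
--         if val == True:
--             if curr_interval == None:
--                 curr_interval = [i, i]
--         else:
--             if curr_interval != None:
--                 curr_interval[1] = i - 1
--                 return curr_interval
--     # if we get here, the burst ends at the end of the signal.
--     if curr_interval != None:
--         curr_interval[1] = len(truth_table) - 1
--
--     return curr_interval
-- ===== SOURCE B (Python) =====
-- def truth_table_to_single_interval(truth_table):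
--     # locate the head of the first True-run, then consume its body
--     start = None
--     for i, v in enumerate(truth_table):
--         if v == True:
--             start = i
--             break
--     if start is None:
--         return None
--     run = 0
--     for v in truth_table[start:]:
--         if v != True:
--             break
--         run += 1
--     return [start, start + run - 1]
-- ===== Notes on version B (the rewrite author's own statement) =====
-- stated objective: alternative
-- what changed: Replaces A's single stateful pass (carrying a mutable curr_interval with mid-loop return and end-of-loop patch-up) by a locate-the-head-then-consume-the-body decomposition: first find the index of the first True, then count the run length from there.
import Mathlib
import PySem

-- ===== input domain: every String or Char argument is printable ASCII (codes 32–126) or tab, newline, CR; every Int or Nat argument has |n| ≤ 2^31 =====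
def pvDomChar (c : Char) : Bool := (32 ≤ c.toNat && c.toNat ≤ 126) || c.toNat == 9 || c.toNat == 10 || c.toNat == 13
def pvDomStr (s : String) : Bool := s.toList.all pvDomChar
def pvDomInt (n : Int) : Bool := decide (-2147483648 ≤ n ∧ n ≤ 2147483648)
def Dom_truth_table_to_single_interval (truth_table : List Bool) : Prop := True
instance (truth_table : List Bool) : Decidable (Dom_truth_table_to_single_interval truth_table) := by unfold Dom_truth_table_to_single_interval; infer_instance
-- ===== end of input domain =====

-- B replaces A's single stateful pass by a find-the-head-then-count-the-run decomposition (same cost).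

-- ===== PORT A =====
-- A's for-loop over enumerate(truth_table), carrying curr_interval (here: the start index,
-- since curr_interval is always [s, s] until it is finished) and the total length for the
-- end-of-loop patch-up `curr_interval[1] = len(truth_table) - 1`.
def pvGoA : List Bool → Nat → Option Nat → Nat → Option (List Int)
  | [], _, curr, n =>
    match curr with
    | some s => some [(s : Int), (n : Int) - 1]
    | none => none
  | v :: rest, i, curr, n =>
    if v = true then
      match curr with
      | none => pvGoA rest (i + 1) (some i) n
      | some s => pvGoA rest (i + 1) (some s) n
    else
      match curr with
      | some s => some [(s : Int), (i : Int) - 1]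
      | none => pvGoA rest (i + 1) none n

def truth_table_to_single_interval (truth_table : List Bool) : Option (List Int) :=
  pvGoA truth_table 0 none truth_table.length

-- ===== PORT B =====
-- Source B's first loop: scan for the first True, returning its index and the suffix from there.
def pvFindStart : List Bool → Nat → Option (Nat × List Bool)
  | [], _ => none
  | v :: rest, i => if v = true then some (i, v :: rest) else pvFindStart rest (i + 1)

-- Source B's second loop: count the leading run of True in the suffix.
def pvRunLen : List Bool → Nat
  | [] => 0
  | v :: rest => if v = true then pvRunLen rest + 1 else 0

def truth_table_to_single_interval_alt (truth_table : List Bool) : Option (List Int) :=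
  match pvFindStart truth_table 0 with
  | none => none
  | some (s, suf) => some [(s : Int), (s : Int) + (pvRunLen suf : Int) - 1]

-- ===== PRECONDITION & SPEC =====
def Spec_truth_table_to_single_interval (truth_table : List Bool) (out : Option (List Int)) : Prop := out = truth_table_to_single_interval_alt truth_table
instance (truth_table : List Bool) (out : Option (List Int)) : Decidable (Spec_truth_table_to_single_interval truth_table out) := by unfold Spec_truth_table_to_single_interval; infer_instance

-- ===== CLAIM (what is proved, stated in full; the proofs are below) =====
def Claim_equal_truth_table_to_single_interval : Prop := ∀ (truth_table : List Bool), Dom_truth_table_to_single_interval truth_table → Spec_truth_table_to_single_interval truth_table (truth_table_to_single_interval truth_table)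

-- ===== LEMMAS AND PROOFS =====

-- Once A has seen the first True at s, it returns [s, j-1] at the first False (j = i + run of the rest)
-- or [s, n-1] at the end; both equal s + run − 1 when n = i + remaining length.
lemma pvGoA_some (rest : List Bool) (i s n : Nat) (hn : n = i + rest.length) :
    pvGoA rest i (some s) n = some [(s : Int), ((i : Int) + (pvRunLen rest : Int)) - 1] := by
  induction rest generalizing i with
  | nil =>
    simp [pvGoA, pvRunLen] at hn ⊢
    omega
  | cons v rest ih =>
    by_cases hv : v = true
    · subst hv
      rw [pvGoA, if_pos rfl, ih (i + 1) (by simp at hn ⊢; omega)]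
      simp [pvRunLen]
      omega
    · simp only [Bool.not_eq_true] at hv; subst hv
      simp [pvGoA, pvRunLen]

lemma pvGoA_none (rest : List Bool) (i n : Nat) (hn : n = i + rest.length) :
    pvGoA rest i none n =
      (match pvFindStart rest i with
       | none => none
       | some (s, suf) => some [(s : Int), (s : Int) + (pvRunLen suf : Int) - 1]) := by
  induction rest generalizing i with
  | nil => simp [pvGoA, pvFindStart]
  | cons v rest ih =>
    by_cases hv : v = true
    · subst hv
      rw [pvGoA, if_pos rfl, pvGoA_some rest (i + 1) i n (by simp at hn ⊢; omega)]
      simp [pvFindStart, pvRunLen]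
      omega
    · simp only [Bool.not_eq_true] at hv; subst hv
      rw [pvGoA]
      simp only [Bool.false_eq_true, if_false]
      rw [ih (i + 1) (by simp at hn ⊢; omega)]
      simp [pvFindStart]

-- ===== VERDICT (by name: the statement is the Claim_ definition above) =====
theorem truth_table_to_single_interval_spec : Claim_equal_truth_table_to_single_interval := by
  intro tt _
  unfold Spec_truth_table_to_single_interval truth_table_to_single_interval
    truth_table_to_single_interval_alt
  exact pvGoA_none tt 0 tt.length (by simp)
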